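-- pv_equiv track=rewrite | github.com/gawain6/TIL | algorithm/programmers/wbros/191109/problem06.py | solution
-- ===== SOURCE A (Python) =====
-- def solution(forms):
--     answer = []
--     for i in range(len(forms)-1):
--         for j in range(len(forms[i][1])-1):
--             s = forms[i][1][j:2+j]
--
--             for k in range(i+1, len(forms)):
--                 if forms[k][1].find(s) >= 0:
--                     answer.append(forms[i][0])
--                     answer.append(forms[k][0])
--
--         answer = list(set(answer))
--         answer.sort()
--     return answer
-- ===== SOURCE B (Python) =====
-- def solution(forms):
--     if len(forms) < 2:
--         return []
--     # one (form, distinct-bigrams) pair per form, and a global bigram -> #forms counter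
--     pairs = []
--     count = {}
--     for form in forms:
--         s = form[1]
--         gs = list(dict.fromkeys(s[j:j + 2] for j in range(len(s) - 1)))
--         pairs.append((form, gs))
--         for g in gs:
--             count[g] = count.get(g, 0) + 1
--     matched = set()
--     for form, gs in pairs:
--         if any(count[g] >= 2 for g in gs):
--             matched.add(form[0])
--     return sorted(matched)
-- ===== Notes on version B (the rewrite author's own statement) =====
-- stated objective: alternative
-- what changed: A compares every ordered pair of forms against every bigram of the first (re-sorting and deduplicating the answer each outer round); B makes one pass that counts, per distinct bigram, how many forms contain it, marks a form matched when one of its bigrams occurs in >= 2 forms, and sorts the matched ids once.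
-- outside the precondition, e.g. on solution([['a', ''], ['b']]): A returns [], B raises IndexError
import Mathlib
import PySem

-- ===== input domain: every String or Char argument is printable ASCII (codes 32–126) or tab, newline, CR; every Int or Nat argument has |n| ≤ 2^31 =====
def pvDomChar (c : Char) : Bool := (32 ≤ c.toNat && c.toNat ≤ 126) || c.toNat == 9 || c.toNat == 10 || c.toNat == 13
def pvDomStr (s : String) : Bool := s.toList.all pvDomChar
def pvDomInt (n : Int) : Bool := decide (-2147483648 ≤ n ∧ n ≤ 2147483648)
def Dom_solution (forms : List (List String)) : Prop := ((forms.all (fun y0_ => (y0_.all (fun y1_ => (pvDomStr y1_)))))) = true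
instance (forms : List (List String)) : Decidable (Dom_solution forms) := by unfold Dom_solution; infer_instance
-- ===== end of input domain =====

-- B replaces A's triple loop over ordered pairs of forms by a single counting pass: per distinct
-- bigram it counts the forms containing it, and a form is matched when one of its bigrams occurs in ≥ 2 forms.

-- ===== PORT A =====
def solution (forms : List (List String)) : List String :=
  (PySem.List.pyRange 0 ((forms.length : Int) - 1)).foldl (fun answer i =>
    PySem.List.sorted (PySem.Set.ofList (
      (PySem.List.pyRange 0 (PySem.Str.len (PySem.List.pyGetD (PySem.List.pyGetD forms i []) 1 "") - 1)).foldl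
        (fun ans j =>
          (PySem.List.pyRange (i + 1) (forms.length : Int)).foldl (fun ans k =>
            if PySem.Str.find (PySem.List.pyGetD (PySem.List.pyGetD forms k []) 1 "")
                 (PySem.Str.slice (PySem.List.pyGetD (PySem.List.pyGetD forms i []) 1 "")
                   (some j) (some (2 + j))) ≥ 0 then
              ans ++ [PySem.List.pyGetD (PySem.List.pyGetD forms i []) 0 "",
                      PySem.List.pyGetD (PySem.List.pyGetD forms k []) 0 ""]
            else ans) ans) answer)) (fun x => x)) []

-- ===== PORT B =====
def bigramsOf (s : String) : List String :=
  PySem.List.dedup ((PySem.List.pyRange 0 (PySem.Str.len s - 1)).map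
    (fun j => PySem.Str.slice s (some j) (some (j + 2))))

def solution_alt (forms : List (List String)) : List String :=
  if forms.length < 2 then []
  else
    let pairs := forms.map (fun form => (form, bigramsOf (PySem.List.pyGetD form 1 "")))
    let count := pairs.foldl (fun d p => p.2.foldl (fun d g => d.insert g (d.getD g 0 + 1)) d)
      (PySem.Dict.empty : PySem.Dict String Int)
    let matched := pairs.foldl (fun m p =>
      if p.2.any (fun g => count.getD g 0 ≥ 2) then PySem.Set.add m (PySem.List.pyGetD p.1 0 "")
      else m) (PySem.Set.empty : PySem.Set String)
    PySem.List.sorted matched (fun x => x)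

-- ===== PRECONDITION & SPEC =====
-- Pre_ excludes inputs with ≥ 2 forms where some form is shorter than an [id, text] pair: there Python A
-- raises IndexError as soon as it indexes such a form, and where it happens never to index it (all texts
-- shorter than 2 characters) A's empty result is an accident of skipped indexing that B's own indexing cannot
-- reproduce (B raises there).
def Pre_solution (forms : List (List String)) : Prop :=
  forms.length ≤ 1 ∨ ∀ f ∈ forms, 2 ≤ f.length
instance (forms : List (List String)) : Decidable (Pre_solution forms) := by
  unfold Pre_solution; infer_instance

def pvWitness_solution : List (List String) := [["a", "ab"], ["b", "bc"]]

def Spec_solution (forms : List (List String)) (out : List String) : Prop := out = solution_alt forms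
instance (forms : List (List String)) (out : List String) : Decidable (Spec_solution forms out) := by
  unfold Spec_solution; infer_instance

-- ===== CLAIM (what is proved, stated in full; the proofs are below) =====
def Claim_equal_solution : Prop := ∀ (forms : List (List String)), Dom_solution forms → Pre_solution forms → Spec_solution forms (solution forms)

-- ===== LEMMAS AND PROOFS =====

-- proof-side abbreviations
def pvId (forms : List (List String)) (p : Nat) : String :=
  PySem.List.pyGetD (forms.getD p []) 0 ""
def pvStr (forms : List (List String)) (p : Nat) : String :=
  PySem.List.pyGetD (forms.getD p []) 1 ""
def pvG (forms : List (List String)) (p : Nat) : List String := bigramsOf (pvStr forms p)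

-- the flat list of everything A's triple loop appends
def bodyA (forms : List (List String)) (i : Int) : List String :=
  (PySem.List.pyRange 0 (PySem.Str.len (PySem.List.pyGetD (PySem.List.pyGetD forms i []) 1 "") - 1)).flatMap
    (fun j =>
      (PySem.List.pyRange (i + 1) (forms.length : Int)).flatMap (fun k =>
        if PySem.Str.find (PySem.List.pyGetD (PySem.List.pyGetD forms k []) 1 "")
             (PySem.Str.slice (PySem.List.pyGetD (PySem.List.pyGetD forms i []) 1 "")
               (some j) (some (2 + j))) ≥ 0 then
          [PySem.List.pyGetD (PySem.List.pyGetD forms i []) 0 "",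
           PySem.List.pyGetD (PySem.List.pyGetD forms k []) 0 ""]
        else []))
def appA (forms : List (List String)) : List String :=
  (PySem.List.pyRange 0 ((forms.length : Int) - 1)).flatMap (bodyA forms)

-- B's intermediate structures, named
def pairsB (forms : List (List String)) : List (List String × List String) :=
  forms.map (fun form => (form, bigramsOf (PySem.List.pyGetD form 1 "")))
def countB (forms : List (List String)) : PySem.Dict String Int :=
  (pairsB forms).foldl (fun d p => p.2.foldl (fun d g => d.insert g (d.getD g 0 + 1)) d)
    (PySem.Dict.empty : PySem.Dict String Int)
def matchedB (forms : List (List String)) : PySem.Set String :=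
  (pairsB forms).foldl (fun m p =>
    if p.2.any (fun g => (countB forms).getD g 0 ≥ 2) then
      PySem.Set.add m (PySem.List.pyGetD p.1 0 "") else m) (PySem.Set.empty : PySem.Set String)

lemma foldl_append_ite {α β : Type} (p : α → Prop) [DecidablePred p] (g : α → List β)
    (l : List α) (acc : List β) :
    l.foldl (fun a x => if p x then a ++ g x else a) acc
      = acc ++ l.flatMap (fun x => if p x then g x else []) := by
  rw [← PySem.List.foldl_append_eq_flatMap]
  apply PySem.List.foldl_congr_mem
  intro a x _
  split_ifs <;> simp

lemma mem_ite_pair {c : Prop} [Decidable c] (u v x : String) :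
    x ∈ (if c then [u, v] else ([] : List String)) ↔ c ∧ (x = u ∨ x = v) := by
  split_ifs with h <;> simp [h]

lemma sortedSet_congr' (l m : List String) (hm : m.Nodup) (h : ∀ x, x ∈ l ↔ x ∈ m) :
    PySem.List.sorted (PySem.Set.ofList l) (fun x => x)
      = PySem.List.sorted m (fun x => x) := by
  apply PySem.List.sorted_eq_sorted_of_perm _ _ _ (fun a b hab => hab)
  rw [List.perm_ext_iff_of_nodup (PySem.Set.nodup_ofList l) hm]
  intro x
  rw [PySem.Set.mem_ofList]
  exact h x

lemma sortedSet_congr (l m : List String) (h : ∀ x, x ∈ l ↔ x ∈ m) :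
    PySem.List.sorted (PySem.Set.ofList l) (fun x => x)
      = PySem.List.sorted (PySem.Set.ofList m) (fun x => x) := by
  apply sortedSet_congr' _ _ (PySem.Set.nodup_ofList m)
  intro x
  rw [PySem.Set.mem_ofList]
  exact h x

lemma outer_fold (body : Int → List String) (l : List Int) (a : List String) :
    l.foldl (fun answer i => PySem.List.sorted (PySem.Set.ofList (answer ++ body i)) (fun x => x))
        (PySem.List.sorted (PySem.Set.ofList a) (fun x => x))
      = PySem.List.sorted (PySem.Set.ofList (a ++ l.flatMap body)) (fun x => x) := by
  induction l generalizing a with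
  | nil => simp
  | cons i t ih =>
    simp only [List.foldl_cons]
    rw [sortedSet_congr (PySem.List.sorted (PySem.Set.ofList a) (fun x => x) ++ body i)
        (a ++ body i) (by intro x; simp [PySem.List.mem_sorted, PySem.Set.mem_ofList]), ih]
    apply sortedSet_congr
    intro x
    simp

lemma inner_eq (forms : List (List String)) (i : Int) (answer : List String) :
    (PySem.List.pyRange 0 (PySem.Str.len (PySem.List.pyGetD (PySem.List.pyGetD forms i []) 1 "") - 1)).foldl
      (fun ans j =>
        (PySem.List.pyRange (i + 1) (forms.length : Int)).foldl (fun ans k =>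
          if PySem.Str.find (PySem.List.pyGetD (PySem.List.pyGetD forms k []) 1 "")
               (PySem.Str.slice (PySem.List.pyGetD (PySem.List.pyGetD forms i []) 1 "")
                 (some j) (some (2 + j))) ≥ 0 then
            ans ++ [PySem.List.pyGetD (PySem.List.pyGetD forms i []) 0 "",
                    PySem.List.pyGetD (PySem.List.pyGetD forms k []) 0 ""]
          else ans) ans) answer = answer ++ bodyA forms i := by
  unfold bodyA
  rw [← PySem.List.foldl_append_eq_flatMap]
  apply PySem.List.foldl_congr_mem
  intro ans j _
  exact foldl_append_ite _ _ _ _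

lemma solution_eq (forms : List (List String)) :
    solution forms = PySem.List.sorted (PySem.Set.ofList (appA forms)) (fun x => x) := by
  unfold solution
  show (PySem.List.pyRange 0 ((forms.length : Int) - 1)).foldl _
      (PySem.List.sorted (PySem.Set.ofList ([] : List String)) (fun x => x)) = _
  rw [PySem.List.foldl_congr_mem _ _
      (fun answer i => PySem.List.sorted (PySem.Set.ofList (answer ++ bodyA forms i)) (fun x => x)) _
      (fun answer i _ => by rw [inner_eq]), outer_fold]
  rfl

lemma getD_fold_pairs (l : List (List String × List String)) (d : PySem.Dict String Int) (g : String) :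
    (l.foldl (fun d p => p.2.foldl (fun d g => d.insert g (d.getD g 0 + 1)) d) d).getD g 0
      = d.getD g 0 + ((l.flatMap (fun p => p.2)).count g : Int) := by
  induction l generalizing d with
  | nil => simp
  | cons p t ih =>
    simp only [List.foldl_cons, List.flatMap_cons, List.count_append, ih,
      PySem.Dict.getD_foldl_insert_add_one]
    push_cast
    ring

lemma count_flatMap_pairs (l : List (List String × List String)) (hl : ∀ p ∈ l, p.2.Nodup)
    (g : String) :
    (l.flatMap (fun p => p.2)).count g = l.countP (fun p => g ∈ p.2) := by
  induction l with
  | nil => simp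
  | cons p t ih =>
    rcases List.forall_mem_cons.mp hl with ⟨hp, ht⟩
    rw [List.flatMap_cons, List.count_append, List.countP_cons, ih ht]
    by_cases hg : g ∈ p.2
    · rw [List.count_eq_one_of_mem hp hg]
      simp [hg]
      omega
    · rw [List.count_eq_zero_of_not_mem hg]
      simp [hg]

lemma nodup_pairsB (forms : List (List String)) : ∀ p ∈ pairsB forms, p.2.Nodup := by
  intro p hp
  rcases List.mem_map.mp hp with ⟨form, _, rfl⟩
  show (bigramsOf _).Nodup
  unfold bigramsOf
  exact PySem.List.nodup_dedup _

lemma getD_countB (forms : List (List String)) (g : String) :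
    (countB forms).getD g 0 = ((pairsB forms).countP (fun p => g ∈ p.2) : Int) := by
  unfold countB
  rw [getD_fold_pairs, count_flatMap_pairs _ (nodup_pairsB forms)]
  have h0 : (PySem.Dict.empty : PySem.Dict String Int).getD g 0 = 0 := rfl
  rw [h0, zero_add]

lemma mem_matched_fold (c : List String × List String → Bool)
    (l : List (List String × List String)) (m : PySem.Set String) (x : String) :
    (x ∈ l.foldl (fun m p => if c p then PySem.Set.add m (PySem.List.pyGetD p.1 0 "") else m) m)
      ↔ x ∈ m ∨ ∃ p ∈ l, c p ∧ x = PySem.List.pyGetD p.1 0 "" := by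
  induction l generalizing m with
  | nil => simp
  | cons p t ih =>
    simp only [List.foldl_cons, List.mem_cons]
    by_cases hc : c p
    · rw [if_pos hc, ih]
      simp only [PySem.Set.mem_add]
      constructor
      · rintro ((h | h) | ⟨q, hq, hcq, hx⟩)
        · exact Or.inl h
        · exact Or.inr ⟨p, Or.inl rfl, hc, h⟩
        · exact Or.inr ⟨q, Or.inr hq, hcq, hx⟩
      · rintro (h | ⟨q, (rfl | hq), hcq, hx⟩)
        · exact Or.inl (Or.inl h)
        · exact Or.inl (Or.inr hx)
        · exact Or.inr ⟨q, hq, hcq, hx⟩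
    · rw [if_neg hc, ih]
      constructor
      · rintro (h | ⟨q, hq, hcq, hx⟩)
        · exact Or.inl h
        · exact Or.inr ⟨q, Or.inr hq, hcq, hx⟩
      · rintro (h | ⟨q, (rfl | hq), hcq, hx⟩)
        · exact Or.inl h
        · exact absurd hcq hc
        · exact Or.inr ⟨q, hq, hcq, hx⟩

lemma nodup_matched_fold (c : List String × List String → Bool)
    (l : List (List String × List String)) (m : PySem.Set String) (hm : List.Nodup m) :
    List.Nodup (l.foldl (fun m p => if c p then PySem.Set.add m (PySem.List.pyGetD p.1 0 "") else m) m) := by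
  induction l generalizing m with
  | nil => exact hm
  | cons p t ih =>
    simp only [List.foldl_cons]
    by_cases hc : c p
    · rw [if_pos hc]; exact ih _ (PySem.Set.nodup_add _ _ hm)
    · rw [if_neg hc]; exact ih _ hm

lemma mem_bigramsOf (s : String) (g : String) :
    g ∈ bigramsOf s ↔ ∃ j : Int, 0 ≤ j ∧ j < PySem.Str.len s - 1 ∧
      g = PySem.Str.slice s (some j) (some (j + 2)) := by
  unfold bigramsOf
  rw [PySem.List.mem_dedup]
  simp only [List.mem_map, PySem.List.mem_pyRange_one]
  constructor
  · rintro ⟨j, ⟨h0, h1⟩, rfl⟩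
    exact ⟨j, h0, h1, rfl⟩
  · rintro ⟨j, h0, h1, rfl⟩
    exact ⟨j, ⟨h0, h1⟩, rfl⟩

lemma bigram_toList (s : String) (j : Int) (h0 : 0 ≤ j) (h1 : j < PySem.Str.len s - 1) :
    (PySem.Str.slice s (some j) (some (j + 2))).toList
        = (s.toList.drop j.toNat).take 2
      ∧ (PySem.Str.slice s (some j) (some (j + 2))).toList.length = 2 := by
  rw [PySem.Str.len_eq] at h1
  have hj : j = ((j.toNat : Nat) : Int) := by omega
  have hlist : (PySem.Str.slice s (some j) (some (j + 2))).toList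
      = (s.toList.drop j.toNat).take 2 := by
    rw [PySem.Str.toList_slice, PySem.Chars.slice_eq_listSlice, hj,
      show ((j.toNat : Int) + 2) = ((j.toNat + 2 : Nat) : Int) by push_cast; ring,
      PySem.List.slice_natCast,
      show j.toNat + 2 - j.toNat = 2 by omega]
    rw [Int.toNat_natCast]
  refine ⟨hlist, ?_⟩
  rw [hlist]
  rw [List.length_take, List.length_drop]
  omega

lemma infix_iff_mem_bigramsOf (g t : String) (hg : g.toList.length = 2) :
    g.toList <:+: t.toList ↔ g ∈ bigramsOf t := by
  constructor
  · intro hinf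
    obtain ⟨j, hpre⟩ := (PySem.Chars.exists_prefix_drop_iff_isIn g.toList t.toList).mpr
      ((PySem.Chars.isIn_iff_infix g.toList t.toList).mpr hinf)
    have hlen : j + 2 ≤ t.toList.length := by
      have h := hpre.length_le
      rw [hg, List.length_drop] at h
      omega
    have h0 : (0 : Int) ≤ (j : Int) := by omega
    have h1 : (j : Int) < PySem.Str.len t - 1 := by
      rw [PySem.Str.len_eq]; omega
    refine (mem_bigramsOf t g).mpr ⟨(j : Int), h0, h1, ?_⟩
    rw [← String.toList_inj, (bigram_toList t (j : Int) h0 h1).1]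
    rw [List.prefix_iff_eq_take] at hpre
    rw [Int.toNat_natCast, ← hg]
    exact hpre
  · intro hmem
    obtain ⟨j, h0, h1, rfl⟩ := (mem_bigramsOf t g).mp hmem
    rw [(bigram_toList t j h0 h1).1]
    exact (List.take_prefix _ _).isInfix.trans (List.drop_suffix _ _).isInfix

lemma shared_iff (s t : String) :
    (∃ j : Int, 0 ≤ j ∧ j < PySem.Str.len s - 1 ∧
        PySem.Str.find t (PySem.Str.slice s (some j) (some (2 + j))) ≥ 0)
      ↔ ∃ g, g ∈ bigramsOf s ∧ g ∈ bigramsOf t := by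
  constructor
  · rintro ⟨j, h0, h1, hfind⟩
    rw [show (2 + j) = (j + 2) by ring] at hfind
    refine ⟨PySem.Str.slice s (some j) (some (j + 2)),
      (mem_bigramsOf s _).mpr ⟨j, h0, h1, rfl⟩, ?_⟩
    exact (infix_iff_mem_bigramsOf _ t (bigram_toList s j h0 h1).2).mp
      ((PySem.Str.find_nonneg_iff t _).mp hfind)
  · rintro ⟨g, hgs, hgt⟩
    obtain ⟨j, h0, h1, rfl⟩ := (mem_bigramsOf s g).mp hgs
    refine ⟨j, h0, h1, ?_⟩
    rw [show (2 + j) = (j + 2) by ring, ge_iff_le, PySem.Str.find_nonneg_iff]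
    exact (infix_iff_mem_bigramsOf _ t (bigram_toList s j h0 h1).2).mpr hgt

lemma mem_appA (forms : List (List String)) (x : String) :
    x ∈ appA forms ↔ ∃ a b : Nat, a < b ∧ b < forms.length ∧
      (∃ g, g ∈ pvG forms a ∧ g ∈ pvG forms b) ∧ (x = pvId forms a ∨ x = pvId forms b) := by
  unfold appA bodyA
  simp only [List.mem_flatMap, PySem.List.mem_pyRange_one]
  constructor
  · rintro ⟨i, ⟨hi0, hi1⟩, j, ⟨hj0, hj1⟩, k, ⟨hk0, hk1⟩, hx⟩
    rw [mem_ite_pair] at hx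
    obtain ⟨hfind, hxor⟩ := hx
    have hk0' : (0 : Int) ≤ k := by omega
    rw [PySem.List.pyGetD_of_nonneg forms ([] : List String) hi0] at hfind hxor hj1
    rw [PySem.List.pyGetD_of_nonneg forms ([] : List String) hk0'] at hfind hxor
    refine ⟨i.toNat, k.toNat, by omega, by omega, ?_, ?_⟩
    · exact (shared_iff (pvStr forms i.toNat) (pvStr forms k.toNat)).mp ⟨j, hj0, hj1, hfind⟩
    · exact hxor
  · rintro ⟨a, b, hab, hb, hshare, hxor⟩
    obtain ⟨j, hj0, hj1, hfind⟩ := (shared_iff (pvStr forms a) (pvStr forms b)).mpr hshare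
    refine ⟨(a : Int), ⟨by omega, by omega⟩, j, ⟨hj0, ?_⟩, (b : Int), ⟨by omega, by omega⟩, ?_⟩
    · rw [PySem.List.pyGetD_natCast]
      exact hj1
    · rw [mem_ite_pair, PySem.List.pyGetD_natCast, PySem.List.pyGetD_natCast]
      exact ⟨hfind, hxor⟩

lemma two_le_countP {α : Type} (q : α → Bool) (l : List α) (a b : Nat) (hab : a < b)
    (hb : b < l.length) (ha : q (l[a]'(by omega)) = true) (hbq : q (l[b]'hb) = true) :
    2 ≤ l.countP q := by
  induction l generalizing a b with
  | nil => simp at hb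
  | cons y t ih =>
    rw [List.countP_cons]
    match b, hb with
    | b' + 1, hb =>
      have hb' : b' < t.length := by simpa using hb
      match a with
      | 0 =>
        have hy : q y = true := ha
        have hpos : 0 < t.countP q :=
          List.countP_pos_iff.mpr ⟨t[b']'hb', List.getElem_mem hb', hbq⟩
        rw [if_pos hy]
        omega
      | a' + 1 =>
        have := ih a' b' (by omega) hb' ha hbq
        split <;> omega

lemma exists_other {α : Type} (q : α → Bool) (l : List α) (a : Nat) (ha : a < l.length)
    (haq : q (l[a]'ha) = true) (h2 : 2 ≤ l.countP q) :
    ∃ b, ∃ hb : b < l.length, b ≠ a ∧ q (l[b]'hb) = true := by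
  induction l generalizing a with
  | nil => simp at ha
  | cons y t ih =>
    rw [List.countP_cons] at h2
    match a with
    | 0 =>
      have hy : q y = true := haq
      rw [if_pos hy] at h2
      obtain ⟨z, hz, hqz⟩ := List.countP_pos_iff.mp (by omega : 0 < t.countP q)
      obtain ⟨b', hb', rfl⟩ := List.mem_iff_getElem.mp hz
      exact ⟨b' + 1, by simpa using hb', by omega, hqz⟩
    | a' + 1 =>
      have ha' : a' < t.length := by simpa using ha
      by_cases hy : q y = true
      · exact ⟨0, by simp, by omega, hy⟩
      · rw [if_neg hy] at h2
        obtain ⟨b, hb, hba, hqb⟩ := ih a' ha' haq (by omega)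
        exact ⟨b + 1, by simpa using hb, by omega, hqb⟩

lemma mem_matchedB (forms : List (List String)) (x : String) :
    x ∈ matchedB forms ↔ ∃ a : Nat, a < forms.length ∧
      (∃ g, g ∈ pvG forms a ∧
        2 ≤ forms.countP (fun form => g ∈ bigramsOf (PySem.List.pyGetD form 1 ""))) ∧
      x = pvId forms a := by
  unfold matchedB
  rw [mem_matched_fold]
  have hempty : (x ∈ (PySem.Set.empty : PySem.Set String)) ↔ False := by
    simp [PySem.Set.empty]
  rw [hempty, false_or]
  constructor
  · rintro ⟨p, hp, hcp, hx⟩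
    rcases List.mem_map.mp hp with ⟨form, hform, rfl⟩
    obtain ⟨a, ha, rfl⟩ := List.mem_iff_getElem.mp hform
    obtain ⟨g, hg, hc⟩ := List.any_eq_true.mp hcp
    refine ⟨a, ha, ⟨g, ?_, ?_⟩, ?_⟩
    · simp only [pvG, pvStr, List.getD_eq_getElem _ _ ha]
      exact hg
    · have := of_decide_eq_true hc
      rw [getD_countB] at this
      rw [show forms.countP (fun form => g ∈ bigramsOf (PySem.List.pyGetD form 1 ""))
            = (pairsB forms).countP (fun p => g ∈ p.2) by
        unfold pairsB; rw [List.countP_map]; rfl]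
      omega
    · simp only [pvId, List.getD_eq_getElem _ _ ha]
      exact hx
  · rintro ⟨a, ha, ⟨g, hg, hc⟩, hx⟩
    refine ⟨(forms[a]'ha, bigramsOf (PySem.List.pyGetD (forms[a]'ha) 1 "")),
      List.mem_map.mpr ⟨forms[a]'ha, List.getElem_mem ha, rfl⟩, ?_, ?_⟩
    · apply List.any_eq_true.mpr
      refine ⟨g, by simp only [pvG, pvStr, List.getD_eq_getElem _ _ ha] at hg; exact hg, ?_⟩
      apply decide_eq_true
      rw [getD_countB]
      rw [show forms.countP (fun form => g ∈ bigramsOf (PySem.List.pyGetD form 1 ""))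
            = (pairsB forms).countP (fun p => g ∈ p.2) by
        unfold pairsB; rw [List.countP_map]; rfl] at hc
      omega
    · simp only [pvId, List.getD_eq_getElem _ _ ha] at hx
      exact hx

lemma mem_appA_iff_mem_matchedB (forms : List (List String)) (x : String) :
    x ∈ appA forms ↔ x ∈ matchedB forms := by
  rw [mem_appA, mem_matchedB]
  constructor
  · rintro ⟨a, b, hab, hb, ⟨g, hga, hgb⟩, hx⟩
    have ha : a < forms.length := by omega
    have hcount : 2 ≤ forms.countP (fun form => g ∈ bigramsOf (PySem.List.pyGetD form 1 "")) := by
      apply two_le_countP _ _ a b hab hb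
      · simp only [pvG, pvStr, List.getD_eq_getElem _ _ ha] at hga
        exact decide_eq_true hga
      · simp only [pvG, pvStr, List.getD_eq_getElem _ _ hb] at hgb
        exact decide_eq_true hgb
    rcases hx with rfl | rfl
    · exact ⟨a, ha, ⟨g, hga, hcount⟩, rfl⟩
    · exact ⟨b, hb, ⟨g, hgb, hcount⟩, rfl⟩
  · rintro ⟨a, ha, ⟨g, hga, hc⟩, rfl⟩
    obtain ⟨b, hb, hba, hqb⟩ := exists_other _ _ a ha
      (by simp only [pvG, pvStr, List.getD_eq_getElem _ _ ha] at hga; exact decide_eq_true hga) hc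
    have hgb : g ∈ pvG forms b := by
      simp only [pvG, pvStr, List.getD_eq_getElem _ _ hb]
      exact of_decide_eq_true hqb
    rcases Nat.lt_or_ge a b with h | h
    · exact ⟨a, b, h, hb, ⟨g, hga, hgb⟩, Or.inl rfl⟩
    · exact ⟨b, a, by omega, ha, ⟨g, hgb, hga⟩, Or.inr rfl⟩

-- ===== VERDICT (by name: the statement is the Claim_ definition above) =====
theorem solution_spec : Claim_equal_solution := by
  intro forms _ _
  unfold Spec_solution
  by_cases h2 : forms.length < 2
  · match forms, h2 with
    | [], _ => rfl
    | [f], _ => rfl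
  · rw [solution_eq]
    have halt : solution_alt forms = PySem.List.sorted (matchedB forms) (fun x => x) := by
      unfold solution_alt
      rw [if_neg h2]
      rfl
    rw [halt]
    exact sortedSet_congr' _ _ (nodup_matched_fold _ _ _ List.nodup_nil)
      (mem_appA_iff_mem_matchedB forms)
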